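-- pv_equiv track=rewrite | github.com/Dzmain-35/MAD-PDC | analysis_modules/network_monitor.py | _is_suspicious_ip_pattern
-- ===== SOURCE A (Python) =====
-- def _is_suspicious_ip_pattern(ip: str) -> bool:
--     """Check for suspicious IP patterns"""
--     # Check for IPs with suspicious patterns
--     # (e.g., sequential numbers, all same digits, etc.)
--     try:
--         parts = [int(p) for p in ip.split('.')]
--
--         # Check for sequential octets
--         if parts == sorted(parts) or parts == sorted(parts, reverse=True):
--             if len(set(parts)) == len(parts):  # All different
--                 return True
--
--         # Check for all same octets
--         if len(set(parts)) == 1: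
--             return True
--
--     except:
--         pass
--
--     return False
-- ===== SOURCE B (Python) =====
-- def _is_suspicious_ip_pattern(ip: str) -> bool:
--     """Check for suspicious IP patterns"""
--     try:
--         parts = [int(p) for p in ip.split('.')]
--     except:
--         return False
--     pairs = list(zip(parts, parts[1:]))
--     inc = all(a < b for a, b in pairs)
--     dec = all(a > b for a, b in pairs)
--     eq = all(a == b for a, b in pairs)
--     return inc or dec or eq
-- ===== Notes on version B (the rewrite author's own statement) =====
-- stated objective: simpler
-- what changed: Replaces the two sorts and the set-distinctness count with a single pass over consecutive pairs testing strictly-increasing / strictly-decreasing / all-equal.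
import Mathlib
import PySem

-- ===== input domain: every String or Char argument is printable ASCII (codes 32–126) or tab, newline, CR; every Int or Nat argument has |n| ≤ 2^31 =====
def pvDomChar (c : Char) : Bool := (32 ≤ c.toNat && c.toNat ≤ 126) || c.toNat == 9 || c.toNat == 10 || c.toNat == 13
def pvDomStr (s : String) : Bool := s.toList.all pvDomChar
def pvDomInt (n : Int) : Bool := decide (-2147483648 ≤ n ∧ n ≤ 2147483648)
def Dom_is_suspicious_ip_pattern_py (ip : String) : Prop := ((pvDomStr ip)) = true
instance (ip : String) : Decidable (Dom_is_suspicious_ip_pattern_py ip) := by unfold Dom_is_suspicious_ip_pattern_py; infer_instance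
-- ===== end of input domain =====

-- B replaces A's two sorts and set-distinctness count by one linear pass over consecutive
-- pairs (strictly increasing / strictly decreasing / all equal); objective: simpler.

-- ===== PORT A =====
-- parts = [int(p) for p in ip.split('.')]; any ValueError -> the bare except -> False
def is_suspicious_ip_pattern_py (ip : String) : Bool :=
  match (PySem.Chars.splitOn ip.toList ['.']).mapM PySem.Int.ofChars? with
  | none => false
  | some parts =>
    if parts = PySem.List.sorted parts (fun x => x) ∨
       parts = PySem.List.sorted parts (fun x => x) true then
      if (PySem.Set.ofList parts).length = parts.length then
        true
      else if (PySem.Set.ofList parts).length = 1 then true else false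
    else if (PySem.Set.ofList parts).length = 1 then true else false

-- ===== PORT B =====
def is_suspicious_ip_pattern_py_alt (ip : String) : Bool :=
  match (PySem.Chars.splitOn ip.toList ['.']).mapM PySem.Int.ofChars? with
  | none => false
  | some parts =>
    let pairs := parts.zip (PySem.List.slice parts (some 1) none)
    (pairs.all fun p => p.1 < p.2) || (pairs.all fun p => p.1 > p.2) ||
      (pairs.all fun p => p.1 == p.2)

-- ===== PRECONDITION & SPEC =====
def Spec_is_suspicious_ip_pattern_py (ip : String) (out : Bool) : Prop := out = is_suspicious_ip_pattern_py_alt ip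
instance (ip : String) (out : Bool) : Decidable (Spec_is_suspicious_ip_pattern_py ip out) := by unfold Spec_is_suspicious_ip_pattern_py; infer_instance

-- ===== CLAIM (what is proved, stated in full; the proofs are below) =====
def Claim_equal_is_suspicious_ip_pattern_py : Prop := ∀ (ip : String), Dom_is_suspicious_ip_pattern_py ip → Spec_is_suspicious_ip_pattern_py ip (is_suspicious_ip_pattern_py ip)

-- ===== LEMMAS AND PROOFS =====

-- l equals its own (stable) sort iff it is weakly increasing
theorem pv_eq_sorted_iff (l : List Int) :
    l = PySem.List.sorted l (fun x => x) ↔ l.Pairwise (· ≤ ·) := by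
  constructor
  · intro h
    have := PySem.List.sorted_pairwise l (fun x => x)
    rw [← h] at this
    exact this
  · intro h
    exact (PySem.List.sorted_eq_self_of_pairwise l (fun x => x) h).symm

theorem pv_eq_sorted_rev_iff (l : List Int) :
    l = PySem.List.sorted l (fun x => x) true ↔ l.Pairwise (fun a b => b ≤ a) := by
  constructor
  · intro h
    have := PySem.List.sorted_pairwise_rev l (fun x => x)
    rw [← h] at this
    exact this
  · intro h
    exact (PySem.List.sorted_rev_eq_self_of_pairwise l (fun x => x) h).symm

theorem pv_ofList_lt_of_not_nodup :
    ∀ l : List Int, ¬ l.Nodup → (PySem.Set.ofList l).length < l.length := by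
  intro l
  induction l with
  | nil => intro h; exact absurd List.nodup_nil h
  | cons a t ih =>
    intro h
    rw [PySem.Set.ofList_cons, List.length_cons, List.length_cons]
    rw [List.nodup_cons] at h
    push Not at h
    by_cases hmem : a ∈ t
    · have ha : a ∈ PySem.Set.ofList t := (PySem.Set.mem_ofList t a).mpr hmem
      have hlt : ((PySem.Set.ofList t).discard a).length < (PySem.Set.ofList t).length := by
        unfold PySem.Set.discard
        refine List.length_filter_lt_length_iff_exists.mpr ⟨a, ha, by simp⟩
      have := PySem.Set.length_ofList_le t
      omega
    · have hnd := h hmem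
      have hle : ((PySem.Set.ofList t).discard a).length ≤ (PySem.Set.ofList t).length := by
        unfold PySem.Set.discard
        exact List.length_filter_le _ _
      have := ih hnd
      omega

theorem pv_setlen_eq_iff_nodup (l : List Int) :
    (PySem.Set.ofList l).length = l.length ↔ l.Nodup := by
  constructor
  · intro h
    by_contra hnd
    have := pv_ofList_lt_of_not_nodup l hnd
    omega
  · intro h
    rw [PySem.Set.ofList_eq_self_of_nodup l h]

theorem pv_setlen_one_iff (l : List Int) :
    (PySem.Set.ofList l).length = 1 ↔ l ≠ [] ∧ l.Pairwise (· = ·) := by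
  constructor
  · intro h
    obtain ⟨a, ha⟩ := List.length_eq_one_iff.mp h
    have hmem : ∀ x ∈ l, x = a := by
      intro x hx
      have : x ∈ PySem.Set.ofList l := (PySem.Set.mem_ofList l x).mpr hx
      rw [ha] at this
      simpa using this
    refine ⟨?_, ?_⟩
    · intro hnil; rw [hnil] at ha; simp [PySem.Set.ofList] at ha
    · exact List.pairwise_of_forall_mem_list (fun x hx y hy => (hmem x hx).trans (hmem y hy).symm)
  · rintro ⟨hne, hp⟩
    obtain ⟨a, t, rfl⟩ := List.exists_cons_of_ne_nil hne
    have hall : ∀ x ∈ t, x = a := by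
      intro x hx
      exact ((List.pairwise_cons.mp hp).1 x hx).symm
    rw [PySem.Set.ofList_cons]
    have : (PySem.Set.ofList t).discard a = [] := by
      unfold PySem.Set.discard
      rw [List.filter_eq_nil_iff]
      intro x hx
      have := hall x ((PySem.Set.mem_ofList t x).mp hx)
      simp [this]
    rw [this]
    rfl

-- adjacent-pairs all f ↔ chain of f
theorem pv_adj_all_iff (f : Int → Int → Bool) :
    ∀ l : List Int, ((l.zip l.tail).all fun p => f p.1 p.2) = true ↔ l.IsChain (fun a b => f a b = true)
  | [] => by simp
  | [a] => by simp
  | a :: b :: t => by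
    have ih := pv_adj_all_iff f (b :: t)
    simp only [List.tail_cons, List.zip_cons_cons, List.all_cons, Bool.and_eq_true,
      List.isChain_cons_cons] at *
    tauto

theorem pv_pairwise_lt_iff (l : List Int) :
    l.Pairwise (· < ·) ↔ l.Pairwise (· ≤ ·) ∧ l.Nodup := by
  constructor
  · intro h
    exact ⟨h.imp (fun hab => le_of_lt hab), h.imp (fun hab => ne_of_lt hab)⟩
  · rintro ⟨h1, h2⟩
    exact (h1.and h2).imp (fun hab => lt_of_le_of_ne hab.1 hab.2)

theorem pv_pairwise_gt_iff (l : List Int) :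
    l.Pairwise (fun a b => b < a) ↔ l.Pairwise (fun a b => b ≤ a) ∧ l.Nodup := by
  constructor
  · intro h
    exact ⟨h.imp (fun hab => le_of_lt hab), h.imp (fun hab => (ne_of_lt hab).symm)⟩
  · rintro ⟨h1, h2⟩
    exact (h1.and h2).imp (fun hab => lt_of_le_of_ne hab.1 (Ne.symm hab.2))

-- the two bodies agree on every parsed octet list
theorem pv_body_eq (parts : List Int) :
    (if parts = PySem.List.sorted parts (fun x => x) ∨
        parts = PySem.List.sorted parts (fun x => x) true then
       if (PySem.Set.ofList parts).length = parts.length then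
         true
       else if (PySem.Set.ofList parts).length = 1 then true else false
     else if (PySem.Set.ofList parts).length = 1 then true else false)
    = (((parts.zip (PySem.List.slice parts (some 1) none)).all fun p => p.1 < p.2) ||
       ((parts.zip (PySem.List.slice parts (some 1) none)).all fun p => p.1 > p.2) ||
       ((parts.zip (PySem.List.slice parts (some 1) none)).all fun p => p.1 == p.2)) := by
  have hs : PySem.List.slice parts (some 1) none = parts.tail := by
    rw [PySem.List.slice_from parts (by norm_num)]
    simp [List.drop_one]
  rw [hs]
  have hlt := pv_adj_all_iff (fun a b => decide (a < b)) parts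
  have hgt := pv_adj_all_iff (fun a b => decide (a > b)) parts
  have heq := pv_adj_all_iff (fun a b => a == b) parts
  simp only [decide_eq_true_eq, beq_iff_eq, gt_iff_lt] at hlt hgt heq
  rw [List.isChain_iff_pairwise] at hlt hgt heq
  rw [Bool.eq_iff_iff]
  have hR : ((((parts.zip parts.tail).all fun p => decide (p.1 < p.2)) ||
       ((parts.zip parts.tail).all fun p => decide (p.1 > p.2)) ||
       ((parts.zip parts.tail).all fun p => p.1 == p.2)) = true) ↔
      (parts.Pairwise (· < ·) ∨ parts.Pairwise (fun a b => b < a) ∨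
       parts.Pairwise (· = ·)) := by
    rw [Bool.or_eq_true, Bool.or_eq_true, hlt, hgt, heq]
    tauto
  rw [hR]
  have hL : ((if parts = PySem.List.sorted parts (fun x => x) ∨
        parts = PySem.List.sorted parts (fun x => x) true then
       if (PySem.Set.ofList parts).length = parts.length then
         true
       else if (PySem.Set.ofList parts).length = 1 then true else false
     else if (PySem.Set.ofList parts).length = 1 then true else false) = true) ↔
      (((parts.Pairwise (· ≤ ·) ∨ parts.Pairwise (fun a b => b ≤ a)) ∧ parts.Nodup) ∨
       (parts ≠ [] ∧ parts.Pairwise (· = ·))) := by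
    rw [← pv_eq_sorted_iff, ← pv_eq_sorted_rev_iff, ← pv_setlen_eq_iff_nodup,
        ← pv_setlen_one_iff]
    split_ifs with h1 h2 h3 <;> simp <;> tauto
  rw [hL, pv_pairwise_lt_iff, pv_pairwise_gt_iff]
  by_cases hnil : parts = []
  · subst hnil
    exact iff_of_true (Or.inl ⟨Or.inl List.Pairwise.nil, List.Pairwise.nil⟩)
      (Or.inl ⟨List.Pairwise.nil, List.Pairwise.nil⟩)
  · clear hs hlt hgt heq hR hL
    tauto

-- ===== VERDICT (by name: the statement is the Claim_ definition above) =====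
theorem is_suspicious_ip_pattern_py_spec : Claim_equal_is_suspicious_ip_pattern_py := by
  intro ip _
  unfold Spec_is_suspicious_ip_pattern_py is_suspicious_ip_pattern_py is_suspicious_ip_pattern_py_alt
  cases h : (PySem.Chars.splitOn ip.toList ['.']).mapM PySem.Int.ofChars? with
  | none => rfl
  | some parts => exact pv_body_eq parts
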